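-- pv_equiv track=rewrite | github.com/mathuin/advent-of-code-2017 | Day9a/Day9a.py | removeGarbage
-- ===== SOURCE A (Python) =====
-- def removeGarbage(chars):
--     trash = False
--
--     for k, v in enumerate(chars):
--         if not trash and v == '<':
--             trash = True
--         if trash:
--             chars[k] = ''
--         if trash and v == '>':
--             trash = False
--     return chars
-- ===== SOURCE B (Python) =====
-- def removeGarbage(chars):
--     # index-jump rewrite: skip to each '<', blank through the matching '>' in one shot
--     res = []
--     rest = chars[:]
--     while rest:
--         try:
--             i = rest.index('<')
--         except ValueError:
--             res += rest
--             break
--         res += rest[:i]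
--         rest = rest[i:]
--         try:
--             j = rest.index('>')
--         except ValueError:
--             j = len(rest) - 1
--         res += [''] * (j + 1)
--         rest = rest[j+1:]
--     chars[:] = res
--     return chars
-- ===== Notes on version B (the rewrite author's own statement) =====
-- stated objective: alternative
-- what changed: Replaces the per-character trash-flag scan by an index-jump loop that locates each '<' with list.index, finds the closing '>' (or the end) with another index call, and blanks the whole inclusive region in one slice assignment.
import Mathlib
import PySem

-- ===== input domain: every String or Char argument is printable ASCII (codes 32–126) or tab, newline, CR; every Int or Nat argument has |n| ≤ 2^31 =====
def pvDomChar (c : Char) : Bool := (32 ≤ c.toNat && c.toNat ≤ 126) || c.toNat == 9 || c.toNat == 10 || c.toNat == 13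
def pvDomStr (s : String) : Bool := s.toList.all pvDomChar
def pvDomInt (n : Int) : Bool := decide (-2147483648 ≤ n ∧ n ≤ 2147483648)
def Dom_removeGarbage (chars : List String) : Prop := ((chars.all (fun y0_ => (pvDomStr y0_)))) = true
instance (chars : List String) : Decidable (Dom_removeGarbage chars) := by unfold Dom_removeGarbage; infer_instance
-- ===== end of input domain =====

-- B replaces the per-character flag scan by index jumps to each '<'/'>' with one-shot slice blanking
-- (alternative decomposition, same O(n) cost); both Pythons mutate `chars` in place identically,
-- the theorems here are about the returned value.

-- ===== PORT A =====
-- A's for-loop over enumerate(chars) with the `trash` flag, as structural recursion carrying the flag.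
def removeGarbageGoA (trash : Bool) : List String → List String
  | [] => []
  | v :: rest =>
    let t1 := if ¬trash ∧ v = "<" then true else trash
    let out := if t1 then "" else v
    let t2 := if t1 ∧ v = ">" then false else t1
    out :: removeGarbageGoA t2 rest

def removeGarbage (chars : List String) : List String := removeGarbageGoA false chars

-- ===== PORT B =====
-- B's while-loop: res/rest accumulator, jump to the next '<' via index, blank through the '>' (or the end).
def removeGarbageGoB (res : List String) (rest : List String) : List String :=
  if rest = [] then res
  else
    match h : PySem.List.index? rest "<" with
    | none => res ++ rest
    | some i =>
      let res1 := res ++ rest.take i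
      let rest1 := rest.drop i
      let j := match PySem.List.index? rest1 ">" with
        | some j => j
        | none => rest1.length - 1
      removeGarbageGoB (res1 ++ List.replicate (j + 1) "") (rest1.drop (j + 1))
termination_by rest.length
decreasing_by
  have hi : i < rest.length := by
    have := PySem.List.getElem_of_index?_eq_some h
    exact this.choose
  have : (rest.drop i).length = rest.length - i := List.length_drop ..
  simp only [List.length_drop]
  omega

def removeGarbage_alt (chars : List String) : List String := removeGarbageGoB [] chars

-- ===== PRECONDITION & SPEC =====
def Spec_removeGarbage (chars : List String) (out : List String) : Prop := out = removeGarbage_alt chars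
instance (chars : List String) (out : List String) : Decidable (Spec_removeGarbage chars out) := by unfold Spec_removeGarbage; infer_instance

-- ===== CLAIM (what is proved, stated in full; the proofs are below) =====
def Claim_equal_removeGarbage : Prop := ∀ (chars : List String), Dom_removeGarbage chars → Spec_removeGarbage chars (removeGarbage chars)

-- ===== LEMMAS AND PROOFS =====

theorem goA_false_no_lt (l : List String) (h : "<" ∉ l) : removeGarbageGoA false l = l := by
  induction l with
  | nil => rfl
  | cons v rest ih =>
    simp only [List.mem_cons, not_or] at h
    simp [removeGarbageGoA, Ne.symm h.1, ih h.2]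

theorem goA_false_append (xs ys : List String) (h : "<" ∉ xs) :
    removeGarbageGoA false (xs ++ ys) = xs ++ removeGarbageGoA false ys := by
  induction xs with
  | nil => rfl
  | cons v rest ih =>
    simp only [List.mem_cons, not_or] at h
    simp [removeGarbageGoA, Ne.symm h.1, ih h.2]

theorem goA_true_spec (l : List String) :
    removeGarbageGoA true l =
      match PySem.List.index? l ">" with
      | some m => List.replicate (m + 1) "" ++ removeGarbageGoA false (l.drop (m + 1)) 
      | none => List.replicate l.length "" := by
  induction l with
  | nil => rfl
  | cons v rest ih =>
    by_cases hv : v = ">"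
    · subst hv
      rw [PySem.List.index?_cons_self]
      simp [removeGarbageGoA, List.replicate_succ]
    · rw [PySem.List.index?_cons_of_ne rest hv]
      cases hm : PySem.List.index? rest ">" with
      | none =>
        rw [hm] at ih
        simp [removeGarbageGoA, hv, ih, List.replicate_succ]
      | some m =>
        rw [hm] at ih
        simp [removeGarbageGoA, hv, ih, List.replicate_succ]

theorem goB_spec (rest res : List String) :
    removeGarbageGoB res rest = res ++ removeGarbageGoA false rest := by
  induction hn : rest.length using Nat.strong_induction_on generalizing rest res with
  | _ n ih =>
  subst hn
  rw [removeGarbageGoB]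
  by_cases hr : rest = []
  · simp [hr, removeGarbageGoA]
  · simp only [hr, if_false]
    cases h : PySem.List.index? rest "<" with
    | none =>
      rw [goA_false_no_lt rest (by rwa [← PySem.List.index?_eq_none_iff])]
    | some i =>
      obtain ⟨pre, suf, hsplit, hlen, hnotmem⟩ := (PySem.List.index?_eq_some_iff _ _ _).mp h
      simp only
      have htake : rest.take i = pre := by
        rw [hsplit, ← hlen, List.take_left]
      have hdrop : rest.drop i = "<" :: suf := by
        rw [hsplit, ← hlen, List.drop_left]
      rw [htake, hdrop]
      have hA : removeGarbageGoA false rest = pre ++ removeGarbageGoA false ("<" :: suf) := by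
        rw [hsplit, goA_false_append _ _ hnotmem]
      have hhead : removeGarbageGoA false ("<" :: suf) = "" :: removeGarbageGoA true suf := by
        simp [removeGarbageGoA]
      rw [hA, hhead]
      have hne : ("<" : String) ≠ ">" := by decide
      rw [PySem.List.index?_cons_of_ne suf hne]
      cases hm : PySem.List.index? suf ">" with
      | some m =>
        simp only [Option.map_some]
        have hsm : m < suf.length := (PySem.List.getElem_of_index?_eq_some hm).choose
        have := ih (suf.drop (m + 1)).length
          (by
            have h1 : i < rest.length := by
              rw [hsplit]; simp [← hlen]
            have h2 : rest.length = pre.length + suf.length + 1 := by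
              simp [hsplit]; omega
            simp only [List.length_drop]
            omega)
          (suf.drop (m + 1)) (res ++ pre ++ List.replicate (m + 1 + 1) "") rfl
        rw [show ("<" :: suf).drop (m + 1 + 1) = suf.drop (m + 1) from by simp, this,
          goA_true_spec, hm]
        simp [List.replicate_succ]
      | none =>
        simp only [Option.map_none]
        have hlen1 : ("<" :: suf).length - 1 = suf.length := by simp
        rw [hlen1]
        have hdropall : ("<" :: suf).drop (suf.length + 1) = [] := by
          apply List.drop_eq_nil_of_le; simp
        rw [hdropall, removeGarbageGoB, if_pos rfl, goA_true_spec, hm]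
        simp [List.replicate_succ]

-- ===== VERDICT (by name: the statement is the Claim_ definition above) =====
theorem removeGarbage_spec : Claim_equal_removeGarbage := by
  intro chars _
  unfold Spec_removeGarbage removeGarbage removeGarbage_alt
  rw [goB_spec]
  rfl
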